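-- pv_equiv track=rewrite | github.com/ts207/Backtest | project/pipelines/backtest/backtest_strategies.py | _execution_family_for_strategies
-- ===== SOURCE A (Python) =====
-- from typing import Dict, List, Tuple
--
-- STRATEGY_EXECUTION_FAMILY = {
--     "vol_compression_v1": "breakout",
--     "liquidity_refill_lag_v1": "mean_reversion",
--     "liquidity_absence_gate_v1": "mean_reversion",
--     "forced_flow_exhaustion_v1": "mean_reversion",
--     "funding_extreme_reversal_v1": "carry",
--     "cross_venue_desync_v1": "spread",
--     "liquidity_vacuum_v1": "mean_reversion",
--     "onchain_flow_v1": "onchain",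
--     "dsl_interpreter_v1": "dsl",
-- }
--
-- def _execution_family_for_strategies(strategies: List[str]) -> str:
--     families = set()
--     for strategy in strategies:
--         strategy_id = str(strategy).strip()
--         if not strategy_id:
--             continue
--         if strategy_id.startswith("dsl_interpreter_v1__"):
--             families.add("dsl")
--             continue
--         families.add(STRATEGY_EXECUTION_FAMILY.get(strategy_id, "unknown"))
--     if len(families) == 1:
--         return next(iter(families))
--     if not families:
--         return "unknown"
--     return "hybrid"
-- ===== SOURCE B (Python) =====
-- from typing import Dict, List, Tuple
--
-- STRATEGY_EXECUTION_FAMILY = {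
--     "vol_compression_v1": "breakout",
--     "liquidity_refill_lag_v1": "mean_reversion",
--     "liquidity_absence_gate_v1": "mean_reversion",
--     "forced_flow_exhaustion_v1": "mean_reversion",
--     "funding_extreme_reversal_v1": "carry",
--     "cross_venue_desync_v1": "spread",
--     "liquidity_vacuum_v1": "mean_reversion",
--     "onchain_flow_v1": "onchain",
--     "dsl_interpreter_v1": "dsl",
-- }
--
-- def _execution_family_for_strategies(strategies: List[str]) -> str:
--     result = None
--     for strategy in strategies:
--         strategy_id = str(strategy).strip()
--         if not strategy_id:
--             continue
--         if strategy_id.startswith("dsl_interpreter_v1__"):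
--             family = "dsl"
--         else:
--             family = STRATEGY_EXECUTION_FAMILY.get(strategy_id, "unknown")
--         if result is None:
--             result = family
--         elif family != result:
--             return "hybrid"
--     return result if result is not None else "unknown"
-- ===== Notes on version B (the rewrite author's own statement) =====
-- stated objective: simpler
-- what changed: Replaces the accumulated set and its post-loop size inspection by a single scalar 'result' with an immediate early return of 'hybrid' on the first family disagreement.
import Mathlib
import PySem

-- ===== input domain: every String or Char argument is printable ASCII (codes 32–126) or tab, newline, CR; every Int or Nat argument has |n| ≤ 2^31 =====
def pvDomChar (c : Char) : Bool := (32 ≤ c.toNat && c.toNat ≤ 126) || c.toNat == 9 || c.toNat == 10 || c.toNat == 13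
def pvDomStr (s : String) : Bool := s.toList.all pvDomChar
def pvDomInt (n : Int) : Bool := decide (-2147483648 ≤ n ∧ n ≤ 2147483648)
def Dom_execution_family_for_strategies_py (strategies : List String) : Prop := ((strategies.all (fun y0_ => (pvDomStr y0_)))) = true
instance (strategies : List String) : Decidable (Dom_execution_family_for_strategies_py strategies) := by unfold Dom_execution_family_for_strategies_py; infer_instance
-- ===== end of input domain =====

-- B replaces A's accumulated set (inspected by size after the loop) with a single scalar and
-- an early 'hybrid' return on the first disagreement; objective: simpler.

-- shared module constant
def STRATEGY_EXECUTION_FAMILY : PySem.Dict String String :=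
  PySem.Dict.ofList [
    ("vol_compression_v1", "breakout"),
    ("liquidity_refill_lag_v1", "mean_reversion"),
    ("liquidity_absence_gate_v1", "mean_reversion"),
    ("forced_flow_exhaustion_v1", "mean_reversion"),
    ("funding_extreme_reversal_v1", "carry"),
    ("cross_venue_desync_v1", "spread"),
    ("liquidity_vacuum_v1", "mean_reversion"),
    ("onchain_flow_v1", "onchain"),
    ("dsl_interpreter_v1", "dsl")]

-- ===== PORT A =====
-- the loop body of A: normalize, skip empty, prefix branch, dict default
def famStep (families : PySem.Set String) (strategy : String) : PySem.Set String :=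
  let strategy_id := PySem.Str.strip strategy
  if strategy_id = "" then families
  else if PySem.Str.startswith strategy_id "dsl_interpreter_v1__" then
    PySem.Set.add families "dsl"
  else
    PySem.Set.add families (STRATEGY_EXECUTION_FAMILY.getD strategy_id "unknown")

-- the post-loop size inspection of A (len==1 → the unique element; empty → "unknown"; else "hybrid")
def famFinish (families : PySem.Set String) : String :=
  match families with
  | [f] => f
  | [] => "unknown"
  | _ => "hybrid"

def execution_family_for_strategies_py (strategies : List String) : String :=
  famFinish (strategies.foldl famStep PySem.Set.empty)

-- ===== PORT B =====
def efGo (strategies : List String) (result : Option String) : String :=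
  match strategies with
  | [] => match result with
          | some r => r
          | none => "unknown"
  | strategy :: rest =>
    let strategy_id := PySem.Str.strip strategy
    if strategy_id = "" then efGo rest result
    else
      let family := if PySem.Str.startswith strategy_id "dsl_interpreter_v1__" then "dsl"
                    else STRATEGY_EXECUTION_FAMILY.getD strategy_id "unknown"
      match result with
      | none => efGo rest (some family)
      | some r => if family ≠ r then "hybrid" else efGo rest result

def execution_family_for_strategies_py_alt (strategies : List String) : String :=
  efGo strategies none

-- ===== PRECONDITION & SPEC =====
def Spec_execution_family_for_strategies_py (strategies : List String) (out : String) : Prop := out = execution_family_for_strategies_py_alt strategies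
instance (strategies : List String) (out : String) : Decidable (Spec_execution_family_for_strategies_py strategies out) := by unfold Spec_execution_family_for_strategies_py; infer_instance

-- ===== CLAIM (what is proved, stated in full; the proofs are below) =====
def Claim_equal_execution_family_for_strategies_py : Prop := ∀ (strategies : List String), Dom_execution_family_for_strategies_py strategies → Spec_execution_family_for_strategies_py strategies (execution_family_for_strategies_py strategies)

-- ===== LEMMAS AND PROOFS =====

-- famStep never shrinks the set
lemma add_len_le (S : PySem.Set String) (x : String) : S.length ≤ (PySem.Set.add S x).length := by
  unfold PySem.Set.add
  split <;> simp

lemma famStep_len_le (S : PySem.Set String) (s : String) : S.length ≤ (famStep S s).length := by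
  unfold famStep
  dsimp only
  split_ifs <;> first | exact le_refl _ | exact add_len_le S _

-- once the set has ≥ 2 elements A's verdict is "hybrid" whatever follows
lemma finish_hybrid (l : List String) : ∀ (S : PySem.Set String), 2 ≤ S.length →
    famFinish (l.foldl famStep S) = "hybrid" := by
  induction l with
  | nil =>
    intro S hS
    match S, hS with
    | a :: b :: t, _ => rfl
  | cons s rest ih =>
    intro S hS
    simpa using ih (famStep S s) (le_trans hS (famStep_len_le S s))

-- the scalar state of B corresponds to the set state of A
lemma efGo_eq (l : List String) : ∀ (r : Option String),
    famFinish (l.foldl famStep r.toList) = efGo l r := by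
  induction l with
  | nil =>
    intro r
    cases r <;> rfl
  | cons s rest ih =>
    intro r
    show famFinish (rest.foldl famStep (famStep r.toList s)) = efGo (s :: rest) r
    rw [efGo]
    by_cases hid : PySem.Str.strip s = ""
    · rw [famStep, if_pos hid, if_pos hid, ih]
    · rw [if_neg hid]
      set family := if PySem.Str.startswith (PySem.Str.strip s) "dsl_interpreter_v1__" then "dsl"
                    else STRATEGY_EXECUTION_FAMILY.getD (PySem.Str.strip s) "unknown" with hfam
      have hstep : famStep r.toList s = PySem.Set.add r.toList family := by
        rw [famStep, if_neg hid, hfam]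
        split_ifs <;> rfl
      cases r with
      | none =>
        have : famStep Option.none.toList s = (Option.some family).toList := by
          rw [hstep]; rfl
        rw [this, ih]
      | some a =>
        by_cases hne : family = a
        · have : famStep (Option.some a).toList s = (Option.some a).toList := by
            rw [hstep, hne, PySem.Set.add]
            simp
          rw [this, ih]
          simp [hne]
        · have h2 : famStep (Option.some a).toList s = [a, family] := by
            rw [hstep, PySem.Set.add]
            simp [PySem.Set.contains, hne]
          rw [h2, finish_hybrid rest [a, family] (by simp)]
          show "hybrid" = if family ≠ a then "hybrid" else efGo rest (some a)
          rw [if_pos hne]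

-- ===== VERDICT (by name: the statement is the Claim_ definition above) =====
theorem execution_family_for_strategies_py_spec : Claim_equal_execution_family_for_strategies_py := by
  intro strategies _
  show execution_family_for_strategies_py strategies = execution_family_for_strategies_py_alt strategies
  rw [execution_family_for_strategies_py, execution_family_for_strategies_py_alt,
    ← efGo_eq strategies none]
  rfl
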